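-- pv_equiv track=rewrite | github.com/himukyd/Graph-Sparsification-for-High-Performance-Graph-Neural-Networks | Plots/local1_sparsification_plot.py | split_none
-- ===== SOURCE A (Python) =====
-- def split_none(xvals, yvals):
--     """Split into segments separated by None, return list of (xs, ys) segments."""
--     segments = []
--     seg_x, seg_y = [], []
--     for xi, yi in zip(xvals, yvals):
--         if yi is not None:
--             seg_x.append(xi)
--             seg_y.append(yi)
--         else:
--             if seg_x:
--                 segments.append((seg_x, seg_y))
--             seg_x, seg_y = [], []
--     if seg_x:
--         segments.append((seg_x, seg_y))
--     return segments
-- ===== SOURCE B (Python) =====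
-- def split_none(xvals, yvals):
--     """Split into segments separated by None, return list of (xs, ys) segments."""
--     pairs = list(zip(xvals, yvals))
--     n = len(pairs)
--     segments = []
--     i = 0
--     while i < n:
--         if pairs[i][1] is None:
--             i += 1
--             continue
--         j = i
--         while j < n and pairs[j][1] is not None:
--             j += 1
--         segments.append(([p[0] for p in pairs[i:j]],
--                          [p[1] for p in pairs[i:j]]))
--         i = j
--     return segments
-- ===== Notes on version B (the rewrite author's own statement) =====
-- stated objective: alternative
-- what changed: B replaces A's accumulator state machine (growing seg_x/seg_y and flushing on None and at the end) with a run-finding scan: it locates each maximal None-free run by index and slices it out, so there is no mutable accumulator and no trailing-flush branch.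
import Mathlib
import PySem

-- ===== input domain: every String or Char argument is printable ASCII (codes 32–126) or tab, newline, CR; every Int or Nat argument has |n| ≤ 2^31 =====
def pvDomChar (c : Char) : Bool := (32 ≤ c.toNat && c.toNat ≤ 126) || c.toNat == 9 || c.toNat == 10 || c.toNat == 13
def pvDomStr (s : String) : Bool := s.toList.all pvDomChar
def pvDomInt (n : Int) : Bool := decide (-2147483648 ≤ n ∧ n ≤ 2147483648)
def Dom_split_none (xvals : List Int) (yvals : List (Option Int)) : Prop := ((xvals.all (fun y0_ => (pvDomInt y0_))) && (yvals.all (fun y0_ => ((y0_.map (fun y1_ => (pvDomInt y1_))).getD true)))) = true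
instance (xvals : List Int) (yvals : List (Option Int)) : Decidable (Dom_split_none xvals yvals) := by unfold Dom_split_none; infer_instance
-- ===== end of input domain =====

-- B replaces A's accumulator state machine with a run-finding scan over the zipped pairs (alternative decomposition, same cost).


-- ===== PORT A =====
-- A's for-loop over zip(xvals, yvals) with accumulators segments / seg_x / seg_y,
-- flushing the current segment on None and after the loop.
def splitNoneLoopA : List (Int × Option Int) → List (List Int × List Int) → List Int → List Int → List (List Int × List Int)
  | [], segments, segX, segY =>
      if segX ≠ [] then segments ++ [(segX, segY)] else segments
  | (xi, some yi) :: rest, segments, segX, segY =>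
      splitNoneLoopA rest segments (segX ++ [xi]) (segY ++ [yi])
  | (_, none) :: rest, segments, segX, segY =>
      splitNoneLoopA rest (if segX ≠ [] then segments ++ [(segX, segY)] else segments) [] []

def split_none (xvals : List Int) (yvals : List (Option Int)) : List (List Int × List Int) :=
  splitNoneLoopA (xvals.zip yvals) [] [] []

-- ===== PORT B =====
-- B scans for the maximal leading None-free run (the inner `while j < n` of Source B)...
def splitNoneRun : List (Int × Option Int) → (List Int × List Int) × List (Int × Option Int)
  | (xi, some yi) :: rest =>
      let (p, leftover) := splitNoneRun rest
      ((xi :: p.1, yi :: p.2), leftover)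
  | l => (([], []), l)

theorem splitNoneRun_length_le : ∀ (l : List (Int × Option Int)), (splitNoneRun l).2.length ≤ l.length
  | [] => le_refl _
  | (_, none) :: _ => by simp [splitNoneRun]
  | (xi, some yi) :: rest => by
      simpa [splitNoneRun] using Nat.le_succ_of_le (splitNoneRun_length_le rest)

-- ... and the outer loop of Source B: skip separators, cut out one run, continue after it.
def splitNoneGroups : List (Int × Option Int) → List (List Int × List Int)
  | [] => []
  | (_, none) :: rest => splitNoneGroups rest
  | (xi, some yi) :: rest =>
      let pr := splitNoneRun rest
      (xi :: pr.1.1, yi :: pr.1.2) :: splitNoneGroups pr.2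
  termination_by l => l.length
  decreasing_by
    · simp
    · have := splitNoneRun_length_le rest
      simp only [List.length_cons]
      omega

def split_none_alt (xvals : List Int) (yvals : List (Option Int)) : List (List Int × List Int) :=
  splitNoneGroups (xvals.zip yvals)

-- ===== PRECONDITION & SPEC =====
def Spec_split_none (xvals : List Int) (yvals : List (Option Int)) (out : List (List Int × List Int)) : Prop := out = split_none_alt xvals yvals
instance (xvals : List Int) (yvals : List (Option Int)) (out : List (List Int × List Int)) : Decidable (Spec_split_none xvals yvals out) := by unfold Spec_split_none; infer_instance

-- ===== CLAIM (what is proved, stated in full; the proofs are below) =====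
def Claim_equal_split_none : Prop := ∀ (xvals : List Int) (yvals : List (Option Int)), Dom_split_none xvals yvals → Spec_split_none xvals yvals (split_none xvals yvals)

-- ===== LEMMAS AND PROOFS =====

theorem loopA_segments (l : List (Int × Option Int)) :
    ∀ (segments : List (List Int × List Int)) (segX segY : List Int),
      splitNoneLoopA l segments segX segY = segments ++ splitNoneLoopA l [] segX segY := by
  induction l with
  | nil => intro segments segX segY; by_cases h : segX = [] <;> simp [splitNoneLoopA, h]
  | cons hd tl ih =>
      intro segments segX segY
      obtain ⟨xi, yi⟩ := hd
      cases yi with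
      | some y =>
          simp only [splitNoneLoopA]
          exact ih segments _ _
      | none =>
          simp only [splitNoneLoopA]
          by_cases h : segX = []
          · simp only [h, ne_eq, not_true_eq_false, if_neg, not_false_eq_true]
            exact ih segments [] []
          · simp only [h, ne_eq, not_false_eq_true, if_pos, List.nil_append]
            rw [ih (segments ++ [(segX, segY)]), ih [(segX, segY)]]
            simp
  -- groupsB rewritten via the leading-run helper

theorem groups_eq_run (l : List (Int × Option Int)) :
    splitNoneGroups l =
      (if (splitNoneRun l).1.1 ≠ [] then [(splitNoneRun l).1] else []) ++
        splitNoneGroups (splitNoneRun l).2 := by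
  match l with
  | [] => simp [splitNoneRun, splitNoneGroups]
  | (xi, none) :: rest => simp [splitNoneRun, splitNoneGroups]
  | (xi, some yi) :: rest => simp [splitNoneRun, splitNoneGroups]

theorem loopA_eq_groups (l : List (Int × Option Int)) :
    ∀ (segX segY : List Int),
      splitNoneLoopA l [] segX segY =
        (if segX ++ (splitNoneRun l).1.1 ≠ [] then
            [(segX ++ (splitNoneRun l).1.1, segY ++ (splitNoneRun l).1.2)] else []) ++
          splitNoneGroups (splitNoneRun l).2 := by
  induction l with
  | nil => intro segX segY; by_cases h : segX = [] <;> simp [splitNoneLoopA, splitNoneRun, splitNoneGroups, h]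
  | cons hd tl ih =>
      intro segX segY
      obtain ⟨xi, yi⟩ := hd
      cases yi with
      | some y =>
          have h := ih (segX ++ [xi]) (segY ++ [y])
          simp only [splitNoneLoopA, splitNoneRun] at h ⊢
          simpa [List.append_assoc] using h
      | none =>
          have hgr := groups_eq_run tl
          simp only [splitNoneLoopA, splitNoneRun]
          by_cases h : segX = []
          · simp only [h, ne_eq, not_true_eq_false, if_neg, not_false_eq_true,
              List.append_nil, List.nil_append]
            rw [show splitNoneGroups ((xi, none) :: tl) = splitNoneGroups tl from by
              simp [splitNoneGroups], hgr, ih [] []]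
            simp
          · simp only [h, ne_eq, not_false_eq_true, if_pos, List.append_nil]
            rw [loopA_segments, ih [] [],
              show splitNoneGroups ((xi, none) :: tl) = splitNoneGroups tl from by
                simp [splitNoneGroups], hgr]
            simp

-- ===== VERDICT (by name: the statement is the Claim_ definition above) =====
theorem split_none_spec : Claim_equal_split_none := by
  intro xvals yvals _
  unfold Spec_split_none split_none split_none_alt
  rw [loopA_eq_groups, groups_eq_run (xvals.zip yvals)]
  simp
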